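-- pv_equiv track=rewrite | github.com/iitis/AGV_quantum | src/utils.py | create_same_way_dict
-- ===== SOURCE A (Python) =====
-- import itertools
--
-- def agv_routes_as_edges(agv_routes: dict[int, tuple]) -> dict[int, list]:  # TODO write test
--     return_dict = {}
--     for j in agv_routes.keys():
--         if len(agv_routes[j]) > 1:
--             s_sp = [(agv_routes[j][i], agv_routes[j][i + 1]) for i in range(len(agv_routes[j]) - 1)]
--             return_dict[j] = s_sp
--     return return_dict
--
-- def create_same_way_dict(agv_routes: dict[int, tuple]) -> dict[tuple, list]:
--     return_dict = {}
--
--     J = agv_routes.keys()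
--     agv_routes_as_edges_dict = agv_routes_as_edges(agv_routes)
--
--     for j, jp in list(itertools.permutations(J, r=2)):
--         temp = []
--         for (s, sp) in agv_routes_as_edges_dict[j]:
--
--             if (s, sp) in agv_routes_as_edges_dict[jp]:
--                 temp.append((s, sp))
--         if len(temp) > 0:
--             return_dict[(j, jp)] = temp
--
--     return return_dict
-- ===== SOURCE B (Python) =====
-- def create_same_way_dict(agv_routes):
--     # inverted index: edge -> routes containing it; one pass per route fills all pair buckets
--     edges = {j: list(zip(route, route[1:])) for j, route in agv_routes.items() if len(route) > 1}
--     index = {}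
--     for j, es in edges.items():
--         for e in es:
--             ids = index.setdefault(e, [])
--             if not ids or ids[-1] != j:
--                 ids.append(j)
--     result = {}
--     for j in agv_routes:
--         bucket = {}
--         for e in edges.get(j, ()):
--             for jp in index[e]:
--                 if jp != j:
--                     bucket.setdefault(jp, []).append(e)
--         for jp in agv_routes:
--             if jp in bucket:
--                 result[(j, jp)] = bucket[jp]
--     return result
-- ===== Notes on version B (the rewrite author's own statement) =====
-- stated objective: faster
-- what changed: Instead of scanning every ordered route pair and testing each edge by a linear membership scan in the other route's edge list, B builds an inverted index from each edge to the routes containing it in one pass and then fills all per-pair shared-edge buckets in a single sweep over each route's edges.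
import Mathlib
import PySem

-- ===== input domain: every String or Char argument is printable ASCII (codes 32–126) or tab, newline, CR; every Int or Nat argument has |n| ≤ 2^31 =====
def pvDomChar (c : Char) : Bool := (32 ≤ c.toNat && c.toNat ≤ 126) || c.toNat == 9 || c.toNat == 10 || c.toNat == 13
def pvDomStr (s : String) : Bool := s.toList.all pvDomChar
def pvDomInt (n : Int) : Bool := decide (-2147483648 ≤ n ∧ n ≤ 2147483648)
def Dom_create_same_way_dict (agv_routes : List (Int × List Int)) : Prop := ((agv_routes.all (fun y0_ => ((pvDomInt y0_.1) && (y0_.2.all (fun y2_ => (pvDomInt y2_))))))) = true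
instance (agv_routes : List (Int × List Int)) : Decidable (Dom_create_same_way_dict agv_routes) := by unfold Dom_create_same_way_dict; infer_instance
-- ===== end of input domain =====

-- B replaces A's per-pair membership scans by an inverted edge→routes index filled in one sweep.
-- (The dict parameter is modelled as PySem.Dict.ofList of the association list, per the type convention.)

-- ===== PORT A =====
-- helper agv_routes_as_edges: consecutive-pair list per route of length > 1
-- (the list indices t[i], t[i+1] are always in range here, so List.getD is exact)
def pvEdgesA (t : List Int) : List (Int × Int) :=
  (List.range (t.length - 1)).map (fun i => (t.getD i 0, t.getD (i + 1) 0))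

def pvAgvRoutesAsEdges (d : PySem.Dict Int (List Int)) : PySem.Dict Int (List (Int × Int)) :=
  d.items.foldl (fun rd p => if 1 < p.2.length then rd.insert p.1 (pvEdgesA p.2) else rd)
    PySem.Dict.empty

-- Python A raises KeyError on a short route among ≥ 2 routes; those inputs are outside Pre_,
-- there `getD _ []` stands in for the raise.
def create_same_way_dict (agv_routes : List (Int × List Int)) : List (Int × Int × List (Int × Int)) :=
  let d := PySem.Dict.ofList agv_routes
  let E := pvAgvRoutesAsEdges d
  let rd := (PySem.List.permutations d.keys 2).foldl (fun rd pr =>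
      match pr with
      | [j, jp] =>
        let temp := (E.getD j []).foldl
          (fun temp e => if e ∈ E.getD jp [] then temp ++ [e] else temp) []
        if 0 < temp.length then rd.insert (j, jp) temp else rd
      | _ => rd) PySem.Dict.empty
  rd.items.map (fun q => (q.1.1, q.1.2, q.2))

-- ===== PORT B =====
-- edges = {j: list(zip(route, route[1:])) for j, route in agv_routes.items() if len(route) > 1}
def pvEdgesDictB (d : PySem.Dict Int (List Int)) : PySem.Dict Int (List (Int × Int)) :=
  PySem.Dict.ofList ((d.items.filter (fun p => 1 < p.2.length)).map
    (fun p => (p.1, p.2.zip (p.2.drop 1))))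

-- ids = index.setdefault(e, []); if not ids or ids[-1] != j: ids.append(j)
def pvIndexStep (j : Int) (ix : PySem.Dict (Int × Int) (List Int)) (e : Int × Int) :
    PySem.Dict (Int × Int) (List Int) :=
  let ids := ix.getD e []
  if ids = [] ∨ ids.getLast? ≠ some j then ix.insert e (ids ++ [j]) else ix

-- inverted index edge -> ids of routes containing it
def pvIndexB (E : PySem.Dict Int (List (Int × Int))) : PySem.Dict (Int × Int) (List Int) :=
  E.items.foldl (fun ix p => p.2.foldl (pvIndexStep p.1) ix) PySem.Dict.empty

-- for jp in index[e]: if jp != j: bucket.setdefault(jp, []).append(e)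
def pvBucketStep (j : Int) (e : Int × Int) (b : PySem.Dict Int (List (Int × Int))) (jp : Int) :
    PySem.Dict Int (List (Int × Int)) :=
  if jp ≠ j then b.modify jp [] (· ++ [e]) else b

-- bucket: jp -> edges shared with route j, filled in one sweep over j's edge list
def pvBucketB (E : PySem.Dict Int (List (Int × Int))) (ix : PySem.Dict (Int × Int) (List Int))
    (j : Int) : PySem.Dict Int (List (Int × Int)) :=
  (E.getD j []).foldl (fun b e => (ix.getD e []).foldl (pvBucketStep j e) b) PySem.Dict.empty

def create_same_way_dict_alt (agv_routes : List (Int × List Int)) : List (Int × Int × List (Int × Int)) :=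
  let d := PySem.Dict.ofList agv_routes
  let edges := pvEdgesDictB d
  let index := pvIndexB edges
  let rd := d.keys.foldl (fun rd j =>
      let bucket := pvBucketB edges index j
      d.keys.foldl (fun rd jp =>
        if bucket.contains jp = true then rd.insert (j, jp) (bucket.getD jp []) else rd) rd)
    PySem.Dict.empty
  rd.items.map (fun q => (q.1.1, q.1.2, q.2))

-- ===== PRECONDITION & SPEC =====
-- Pre_ excludes exactly the inputs where Python A raises KeyError: at least two (distinct) route
-- keys and some route with fewer than 2 stations (that route is missing from the edges dict).
def Pre_create_same_way_dict (agv_routes : List (Int × List Int)) : Prop :=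
  (PySem.Dict.ofList agv_routes).items.length < 2 ∨
    ∀ p ∈ (PySem.Dict.ofList agv_routes).items, 2 ≤ p.2.length
instance (agv_routes : List (Int × List Int)) : Decidable (Pre_create_same_way_dict agv_routes) := by
  unfold Pre_create_same_way_dict; infer_instance

def pvWitness_create_same_way_dict : (List (Int × List Int)) := [(0, [1, 2]), (1, [2, 3])]

def Spec_create_same_way_dict (agv_routes : List (Int × List Int)) (out : List (Int × Int × List (Int × Int))) : Prop := out = create_same_way_dict_alt agv_routes
instance (agv_routes : List (Int × List Int)) (out : List (Int × Int × List (Int × Int))) : Decidable (Spec_create_same_way_dict agv_routes out) := by unfold Spec_create_same_way_dict; infer_instance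

-- ===== CLAIM (what is proved, stated in full; the proofs are below) =====
def Claim_equal_create_same_way_dict : Prop := ∀ (agv_routes : List (Int × List Int)), Dom_create_same_way_dict agv_routes → Pre_create_same_way_dict agv_routes → Spec_create_same_way_dict agv_routes (create_same_way_dict agv_routes)

-- ===== LEMMAS AND PROOFS =====

-- edge lists built by index comprehension and by zip coincide
lemma pvEdges_eq (t : List Int) : pvEdgesA t = t.zip (t.drop 1) := by
  apply List.ext_getElem
  · simp [pvEdgesA]
  · intro i h1 h2
    have hi : i < t.length - 1 := by simpa [pvEdgesA] using h1
    simp [pvEdgesA, List.getD_eq_getElem?_getD, List.getElem?_eq_getElem (by omega : i < t.length),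
      List.getElem?_eq_getElem (by omega : i + 1 < t.length)]

-- a fold of conditional inserts with fresh, distinct keys appends its selected items
lemma pvItemsFoldlCondInsert {κ ν β : Type} [BEq κ] [LawfulBEq κ]
    (P : β → Prop) [DecidablePred P] (k : β → κ) (v : β → ν) :
    ∀ (l : List β) (d : PySem.Dict κ ν), (∀ a ∈ l, d.contains (k a) = false) →
      (l.map k).Nodup →
      (l.foldl (fun d a => if P a then d.insert (k a) (v a) else d) d).items
        = d.items ++ (l.filter (fun a => decide (P a))).map (fun a => (k a, v a)) := by
  intro l
  induction l with
  | nil => simp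
  | cons a l ih =>
    intro d hfresh hnd
    simp only [List.map_cons, List.nodup_cons] at hnd
    by_cases hc : P a
    · have hfr := hfresh a (by simp)
      have hitems := PySem.Dict.items_insert_of_not_contains (d := d) (v := v a) hfr
      have hrest : ∀ b ∈ l, (d.insert (k a) (v a)).contains (k b) = false := by
        intro b hb
        rw [PySem.Dict.contains_insert]
        have : k b ≠ k a := fun h => hnd.1 (h ▸ List.mem_map_of_mem hb)
        simp [this, hfresh b (List.mem_cons_of_mem _ hb)]
      simp only [List.foldl_cons, hc, if_pos]
      rw [ih _ hrest hnd.2, hitems]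
      simp [hc]
    · simp only [List.foldl_cons, hc, if_neg, not_false_iff]
      rw [ih _ (fun b hb => hfresh b (List.mem_cons_of_mem _ hb)) hnd.2]
      simp [hc]

-- the two edge dicts are equal
lemma pvEdgesDict_eq (d : PySem.Dict Int (List Int)) (h : d.keys.Nodup) :
    pvEdgesDictB d = pvAgvRoutesAsEdges d := by
  have hnd2 : (((d.items.filter (fun p => decide (1 < p.2.length))).map
      (fun p => (p.1, p.2.zip (p.2.drop 1)))).map (fun q => q.1)).Nodup := by
    have hsub : ((d.items.filter (fun p => decide (1 < p.2.length))).map (fun p => p.1)).Sublist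
        (d.items.map (fun p => p.1)) := List.Sublist.map _ List.filter_sublist
    simpa [Function.comp, List.map_map] using hsub.nodup h
  apply PySem.Dict.ext
  rw [show pvEdgesDictB d = PySem.Dict.ofList ((d.items.filter (fun p => 1 < p.2.length)).map
    (fun p => (p.1, p.2.zip (p.2.drop 1)))) from rfl]
  rw [PySem.Dict.ofList, PySem.Dict.update]
  have hB := PySem.Dict.items_foldl_insert_fresh
      ((d.items.filter (fun p => decide (1 < p.2.length))).map (fun p => (p.1, p.2.zip (p.2.drop 1))))
      (fun q => q.1) (fun q => q.2) PySem.Dict.empty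
      (by intro a _; exact PySem.Dict.contains_empty _) hnd2
  rw [hB]
  have hA := pvItemsFoldlCondInsert (fun p : Int × List Int => 1 < p.2.length)
      (fun p => p.1) (fun p => pvEdgesA p.2) d.items PySem.Dict.empty
      (by intro a _; exact PySem.Dict.contains_empty _) (by simpa using h)
  rw [pvAgvRoutesAsEdges, hA]
  simp [List.map_map, Function.comp, pvEdges_eq]

-- the edges dict keeps a duplicate-free key list
lemma pvE_keys_nodup (d : PySem.Dict Int (List Int)) (h : d.keys.Nodup) :
    (pvAgvRoutesAsEdges d).keys.Nodup := by
  rw [← pvEdgesDict_eq d h]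
  exact PySem.Dict.nodup_keys_ofList _

-- permutations with r = 1
lemma pvPerm1 {α : Type} (ys : List α) :
    PySem.List.permutations ys 1 = ys.map (fun y => [y]) := by
  have h0 : ∀ xs : List α, PySem.List.permutations xs 0 = [[]] := fun _ => rfl
  rw [PySem.List.permutations]
  induction ys with
  | nil => simp
  | cons y ys ih =>
    simp only [List.length_cons, List.range_succ_eq_map, List.flatMap_cons, List.getElem?_cons_zero,
      List.flatMap_map, List.getElem?_cons_succ, h0] at *
    simp_all

-- permutations with r = 2 on a duplicate-free list: all ordered pairs, in list order
lemma pvPerm2 (xs : List Int) (h : xs.Nodup) :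
    PySem.List.permutations xs 2
      = xs.flatMap (fun j => (xs.filter (fun jp => jp != j)).map (fun jp => [j, jp])) := by
  rw [PySem.List.permutations]
  refine Eq.trans (List.flatMap_congr
    (g := fun i => (xs.filter (fun jp => jp != xs[i]!)).map (fun jp => [xs[i]!, jp])) ?_) ?_
  · intro i hi
    rw [List.mem_range] at hi
    have hget : xs[i]? = some xs[i] := List.getElem?_eq_getElem hi
    have hbang : xs[i]! = xs[i] := by
      simp [List.getElem!_eq_getElem?_getD, hget]
    simp only [hget, hbang]
    rw [pvPerm1, ← List.Nodup.erase_getElem h i hi, List.Nodup.erase_eq_filter h]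
    simp [List.map_map, Function.comp]
  · rw [List.flatMap_def, List.flatMap_def]
    congr 1
    apply List.ext_getElem
    · simp
    · intro i h1 h2
      simp only [List.getElem_map, List.getElem_range]
      congr 1 <;> simp [List.getElem!_eq_getElem?_getD,
        List.getElem?_eq_getElem (by simpa using h1 : i < xs.length)]

-- one route's pass over the inverted index appends its id to every edge it contains
lemma pvIndexRoute (j : Int) : ∀ (es pro : List (Int × Int))
    (ix0 ix : PySem.Dict (Int × Int) (List Int)),
    (∀ e, (ix0.getD e []).getLast? ≠ some j) →
    (∀ e, ix.getD e [] = ix0.getD e [] ++ (if e ∈ pro then [j] else [])) →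
    ∀ e, (es.foldl (pvIndexStep j) ix).getD e []
      = ix0.getD e [] ++ (if e ∈ pro ++ es then [j] else []) := by
  intro es
  induction es with
  | nil => intro pro ix0 ix h0 hix e; simpa using hix e
  | cons e0 es ih =>
    intro pro ix0 ix h0 hix e
    rw [List.foldl_cons]
    by_cases hmem : e0 ∈ pro
    · have hids : ix.getD e0 [] = ix0.getD e0 [] ++ [j] := by rw [hix e0, if_pos hmem]
      have hguard : ¬ (ix.getD e0 [] = [] ∨ (ix.getD e0 []).getLast? ≠ some j) := by
        rw [hids]; simp [List.getLast?_append]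
      rw [show pvIndexStep j ix e0 = ix from by simp [pvIndexStep, hguard]]
      have := ih (pro ++ [e0]) ix0 ix h0 (by
        intro e'; rw [hix e']
        congr 1
        by_cases he : e' = e0
        · subst he; simp [hmem]
        · simp [he])
      rw [this e]
      congr 1
      by_cases he : e ∈ pro ++ e0 :: es <;> by_cases he' : e ∈ (pro ++ [e0]) ++ es <;> simp_all
    · have hids : ix.getD e0 [] = ix0.getD e0 [] := by rw [hix e0, if_neg hmem]; simp
      have hguard : ix.getD e0 [] = [] ∨ (ix.getD e0 []).getLast? ≠ some j := by
        rw [hids]; exact Or.inr (h0 e0)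
      rw [show pvIndexStep j ix e0 = ix.insert e0 (ix.getD e0 [] ++ [j]) from by
        simp [pvIndexStep, hguard]]
      have := ih (pro ++ [e0]) ix0 (ix.insert e0 (ix.getD e0 [] ++ [j])) h0 (by
        intro e'
        by_cases he : e' = e0
        · subst he
          rw [PySem.Dict.getD_insert, if_pos rfl, hids]
          simp [hmem]
        · rw [PySem.Dict.getD_insert, if_neg he, hix e']
          congr 1
          simp [he])
      rw [this e]
      congr 1
      by_cases he : e ∈ pro ++ e0 :: es <;> by_cases he' : e ∈ (pro ++ [e0]) ++ es <;> simp_all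

lemma pvIndexItemsAux : ∀ (l : List (Int × List (Int × Int)))
    (ix0 : PySem.Dict (Int × Int) (List Int)), (l.map (·.1)).Nodup →
    (∀ e j', j' ∈ l.map (·.1) → (ix0.getD e []).getLast? ≠ some j') →
    ∀ e, (l.foldl (fun ix p => p.2.foldl (pvIndexStep p.1) ix) ix0).getD e []
      = ix0.getD e [] ++ (l.filter (fun p => decide (e ∈ p.2))).map (·.1) := by
  intro l
  induction l with
  | nil => simp
  | cons p l ih =>
    intro ix0 hnd h0 e
    simp only [List.map_cons, List.nodup_cons] at hnd
    rw [List.foldl_cons]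
    have hroute := pvIndexRoute p.1 p.2 [] ix0 ix0
      (fun e' => h0 e' p.1 (by simp)) (by intro e'; simp)
    have hlast : ∀ e' j', j' ∈ l.map (·.1) →
        (((p.2.foldl (pvIndexStep p.1) ix0)).getD e' []).getLast? ≠ some j' := by
      intro e' j' hj'
      rw [hroute e']
      simp only [List.nil_append]
      by_cases he : e' ∈ p.2
      · rw [if_pos he, List.getLast?_append]
        have hne : j' ≠ p.1 := fun hh => hnd.1 (hh ▸ hj')
        simp [hne.symm]
      · rw [if_neg he]
        simpa using h0 e' j' (by simp [hj'])
    rw [ih _ hnd.2 hlast e, hroute e]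
    simp only [List.nil_append, List.filter_cons]
    by_cases he : e ∈ p.2 <;> simp [he]

-- the inverted index maps an edge to the ids of the routes containing it, in route order
lemma pvIndex_getD (E : PySem.Dict Int (List (Int × Int))) (h : E.keys.Nodup) (e : Int × Int) :
    (pvIndexB E).getD e [] = (E.items.filter (fun p => decide (e ∈ p.2))).map (·.1) := by
  rw [pvIndexB, pvIndexItemsAux E.items PySem.Dict.empty (by simpa using h)
    (by intro e' j' _; simp [PySem.Dict.getD_empty])]
  simp [PySem.Dict.getD_empty]

lemma pvIndex_nodup (E : PySem.Dict Int (List (Int × Int))) (h : E.keys.Nodup) (e : Int × Int) :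
    ((pvIndexB E).getD e []).Nodup := by
  rw [pvIndex_getD E h e]
  have hsub : ((E.items.filter (fun p => decide (e ∈ p.2))).map (fun p => p.1)).Sublist
      (E.items.map (fun p => p.1)) := List.Sublist.map _ List.filter_sublist
  exact hsub.nodup h

lemma pvIndex_mem (E : PySem.Dict Int (List (Int × Int))) (h : E.keys.Nodup) (e : Int × Int)
    (jp : Int) : jp ∈ (pvIndexB E).getD e [] ↔ e ∈ E.getD jp [] := by
  rw [pvIndex_getD E h e]
  simp only [List.mem_map, List.mem_filter, decide_eq_true_eq]
  constructor
  · rintro ⟨⟨jp', es⟩, ⟨hmem, he⟩, rfl⟩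
    rw [PySem.Dict.getD_of_mem_items E hmem h []]
    exact he
  · intro he
    rw [PySem.Dict.getD_eq_get?_getD] at he
    cases hq : E.get? jp with
    | none => rw [hq] at he; simp at he
    | some es =>
      rw [hq] at he
      exact ⟨(jp, es), ⟨(PySem.Dict.get?_eq_some_iff_mem_items E jp es h).1 hq, he⟩, rfl⟩

lemma pvBucketInner_getD (j : Int) (e : Int × Int) : ∀ (ids : List Int), ids.Nodup →
    ∀ (b : PySem.Dict Int (List (Int × Int))) (jp : Int),
    (ids.foldl (pvBucketStep j e) b).getD jp []
      = b.getD jp [] ++ (if jp ∈ ids ∧ jp ≠ j then [e] else []) := by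
  intro ids
  induction ids with
  | nil => simp
  | cons x ids ih =>
    intro hnd b jp
    simp only [List.nodup_cons] at hnd
    rw [List.foldl_cons]
    by_cases hx : x = j
    · rw [show pvBucketStep j e b x = b from by simp [pvBucketStep, hx]]
      rw [ih hnd.2 b jp]
      congr 1
      by_cases hj : jp = j
      · simp [hj]
      · by_cases hm : jp ∈ ids <;> simp [hm, hj, hx]
    · rw [show pvBucketStep j e b x = b.modify x [] (· ++ [e]) from by simp [pvBucketStep, hx]]
      rw [ih hnd.2 _ jp]
      by_cases hjx : jp = x
      · subst hjx
        rw [PySem.Dict.getD_modify, if_pos rfl]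
        simp [hnd.1, hx]
      · rw [PySem.Dict.getD_modify, if_neg hjx]
        congr 1
        simp [hjx]

lemma pvBucketInner_contains (j : Int) (e : Int × Int) : ∀ (ids : List Int),
    ∀ (b : PySem.Dict Int (List (Int × Int))) (jp : Int),
    (ids.foldl (pvBucketStep j e) b).contains jp
      = (b.contains jp || decide (jp ∈ ids ∧ jp ≠ j)) := by
  intro ids
  induction ids with
  | nil => simp
  | cons x ids ih =>
    intro b jp
    rw [List.foldl_cons]
    by_cases hx : x = j
    · rw [show pvBucketStep j e b x = b from by simp [pvBucketStep, hx]]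
      rw [ih b jp]
      congr 1
      by_cases hj : jp = j
      · simp [hj]
      · by_cases hm : jp ∈ ids <;> simp [hm, hj, hx]
    · rw [show pvBucketStep j e b x = b.modify x [] (· ++ [e]) from by simp [pvBucketStep, hx]]
      rw [ih _ jp]
      rw [PySem.Dict.contains_modify]
      by_cases hjx : jp = x
      · subst hjx
        simp [hx]
      · by_cases hm : jp ∈ ids <;> by_cases hj : jp = j <;> simp_all

-- bucket characterisation: value list and key membership
lemma pvBucket_getD (E : PySem.Dict Int (List (Int × Int))) (ix : PySem.Dict (Int × Int) (List Int))
    (hix : ∀ e, (ix.getD e []).Nodup) (j jp : Int) :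
    (pvBucketB E ix j).getD jp []
      = (E.getD j []).filter (fun e => decide (jp ∈ ix.getD e []) && decide (jp ≠ j)) := by
  rw [pvBucketB]
  suffices h : ∀ (es : List (Int × Int)) (b : PySem.Dict Int (List (Int × Int))),
      (es.foldl (fun b e => (ix.getD e []).foldl (pvBucketStep j e) b) b).getD jp []
        = b.getD jp [] ++ es.filter (fun e => decide (jp ∈ ix.getD e []) && decide (jp ≠ j)) by
    rw [h _ PySem.Dict.empty]; simp [PySem.Dict.getD_empty]
  intro es
  induction es with
  | nil => simp
  | cons e es ih =>
    intro b
    rw [List.foldl_cons, ih, pvBucketInner_getD j e _ (hix e) b jp, List.filter_cons]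
    by_cases hm : jp ∈ ix.getD e [] ∧ jp ≠ j
    · simp [hm.1, hm.2, List.append_assoc]
    · have hb : ¬ (decide (jp ∈ ix.getD e []) && decide (jp ≠ j)) = true := by
        simpa using fun a b => hm ⟨a, b⟩
      simp only [if_neg hm, List.append_nil]
      simp at hb
      simpa using hb

lemma pvBucket_contains (E : PySem.Dict Int (List (Int × Int)))
    (ix : PySem.Dict (Int × Int) (List Int)) (j jp : Int) :
    (pvBucketB E ix j).contains jp
      = (E.getD j []).any (fun e => decide (jp ∈ ix.getD e []) && decide (jp ≠ j)) := by
  rw [pvBucketB]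
  suffices h : ∀ (es : List (Int × Int)) (b : PySem.Dict Int (List (Int × Int))),
      (es.foldl (fun b e => (ix.getD e []).foldl (pvBucketStep j e) b) b).contains jp
        = (b.contains jp || es.any (fun e => decide (jp ∈ ix.getD e []) && decide (jp ≠ j))) by
    rw [h _ PySem.Dict.empty]; simp
  intro es
  induction es with
  | nil => simp
  | cons e es ih =>
    intro b
    rw [List.foldl_cons, ih, pvBucketInner_contains j e _ b jp, List.any_cons]
    by_cases hm : jp ∈ ix.getD e [] ∧ jp ≠ j
    · simp [hm.1, hm.2]
    · simp only at *
      by_cases h1 : jp ∈ ix.getD e [] <;> by_cases h2 : jp = j <;> simp_all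

-- the nested result-building loop shared by both ports
lemma pvOuterItems (L : Int → List Int) (C : Int → Int → Prop) [∀ j jp, Decidable (C j jp)]
    (V : Int → Int → List (Int × Int)) (hL : ∀ j, (L j).Nodup) :
    ∀ (js : List Int) (rd : PySem.Dict (Int × Int) (List (Int × Int))), js.Nodup →
      (∀ q ∈ rd.keys, q.1 ∉ js) →
      (js.foldl (fun rd j => (L j).foldl (fun rd jp =>
          if C j jp then rd.insert (j, jp) (V j jp) else rd) rd) rd).items
        = rd.items ++ js.flatMap (fun j =>
            ((L j).filter (fun jp => decide (C j jp))).map (fun jp => ((j, jp), V j jp))) := by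
  intro js
  induction js with
  | nil => simp
  | cons j js ih =>
    intro rd hnd hkeys
    simp only [List.nodup_cons] at hnd
    rw [List.foldl_cons]
    have hfresh : ∀ jp ∈ L j, rd.contains (j, jp) = false := by
      intro jp _
      by_contra hc
      have : (j, jp) ∈ rd.keys := (PySem.Dict.contains_iff_mem_keys _ _).1 (by
        cases h : rd.contains (j, jp) with
        | true => rfl
        | false => exact absurd h hc)
      exact hkeys _ this (by simp)
    have hmapnd : ((L j).map (fun jp => (j, jp))).Nodup :=
      (hL j).map (fun a b hab => by simpa using hab)
    have hinner := pvItemsFoldlCondInsert (C j) (fun jp => (j, jp)) (V j) (L j) rd hfresh hmapnd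
    have hkeys' : ∀ q ∈ (((L j).foldl (fun rd jp =>
        if C j jp then rd.insert (j, jp) (V j jp) else rd) rd)).keys, q.1 ∉ js := by
      intro q hq
      have : q ∈ (((L j).foldl (fun rd jp =>
          if C j jp then rd.insert (j, jp) (V j jp) else rd) rd)).items.map (·.1) := hq
      rw [hinner] at this
      simp only [List.map_append, List.mem_append, List.map_map] at this
      rcases this with hold | hnew
      · have := hkeys q hold
        simp only [List.mem_cons, not_or] at this
        exact this.2
      · simp only [Function.comp, List.mem_map] at hnew
        obtain ⟨jp, _, rfl⟩ := hnew
        exact hnd.1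
    rw [ih _ hnd.2 hkeys', hinner]
    simp [List.append_assoc]

-- ===== VERDICT (by name: the statement is the Claim_ definition above) =====
theorem create_same_way_dict_spec : Claim_equal_create_same_way_dict := by
  intro agv _ _
  unfold Spec_create_same_way_dict
  simp only [create_same_way_dict, create_same_way_dict_alt]
  have hd : (PySem.Dict.ofList agv).keys.Nodup := PySem.Dict.nodup_keys_ofList agv
  rw [pvPerm2 _ hd, List.foldl_flatMap]
  simp only [List.foldl_map]
  simp only [PySem.List.foldl_append_ite_eq_filter, List.nil_append]
  rw [pvEdgesDict_eq _ hd]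
  have hE : (pvAgvRoutesAsEdges (PySem.Dict.ofList agv)).keys.Nodup := pvE_keys_nodup _ hd
  have hA := pvOuterItems (fun j => (PySem.Dict.ofList agv).keys.filter (fun jp => jp != j))
      (fun j jp => 0 < ((pvAgvRoutesAsEdges (PySem.Dict.ofList agv)).getD j [] |>.filter
        (fun e => decide (e ∈ (pvAgvRoutesAsEdges (PySem.Dict.ofList agv)).getD jp []))).length)
      (fun j jp => (pvAgvRoutesAsEdges (PySem.Dict.ofList agv)).getD j [] |>.filter
        (fun e => decide (e ∈ (pvAgvRoutesAsEdges (PySem.Dict.ofList agv)).getD jp [])))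
      (fun j => hd.filter _) (PySem.Dict.ofList agv).keys PySem.Dict.empty hd
      (by intro q hq; simp [PySem.Dict.keys_empty] at hq)
  rw [hA]
  have hB := pvOuterItems (fun _ => (PySem.Dict.ofList agv).keys)
      (fun j jp => (pvBucketB (pvAgvRoutesAsEdges (PySem.Dict.ofList agv))
        (pvIndexB (pvAgvRoutesAsEdges (PySem.Dict.ofList agv))) j).contains jp = true)
      (fun j jp => (pvBucketB (pvAgvRoutesAsEdges (PySem.Dict.ofList agv))
        (pvIndexB (pvAgvRoutesAsEdges (PySem.Dict.ofList agv))) j).getD jp [])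
      (fun _ => hd) (PySem.Dict.ofList agv).keys PySem.Dict.empty hd
      (by intro q hq; simp [PySem.Dict.keys_empty] at hq)
  rw [hB]
  beta_reduce
  apply congrArg
  apply congrArg
  apply List.flatMap_congr
  intro j hj
  have hEix : ∀ e, ((pvIndexB (pvAgvRoutesAsEdges (PySem.Dict.ofList agv))).getD e []).Nodup :=
    pvIndex_nodup _ hE
  simp only [pvBucket_getD _ _ hEix, pvBucket_contains, pvIndex_mem _ hE, Bool.decide_eq_true,
    List.filter_filter]
  have hpred : ∀ jp ∈ (PySem.Dict.ofList agv).keys,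
      ((pvAgvRoutesAsEdges (PySem.Dict.ofList agv)).getD j []).any
          (fun e => decide (e ∈ (pvAgvRoutesAsEdges (PySem.Dict.ofList agv)).getD jp []) && decide (jp ≠ j))
        = (decide (0 < (((pvAgvRoutesAsEdges (PySem.Dict.ofList agv)).getD j []).filter
            (fun e => decide (e ∈ (pvAgvRoutesAsEdges (PySem.Dict.ofList agv)).getD jp []))).length) && (jp != j)) := by
    intro jp _
    by_cases hj' : jp = j
    · simp [hj']
    · rw [Bool.eq_iff_iff]
      simp [hj', List.any_eq_true, List.length_pos_iff, List.filter_eq_nil_iff]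
  rw [List.filter_congr hpred]
  apply List.map_congr_left
  intro jp hjp
  have hcond := (List.mem_filter.1 hjp).2
  have hne : jp ≠ j := by
    have h2 := (Bool.and_eq_true _ _ |>.mp hcond).2
    simpa using h2
  simp [hne]
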